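-- pv_equiv track=rewrite | github.com/SidneyPiper/advent_of_code_2023 | Day 14/day14_2023.py | spin_cycle
-- ===== SOURCE A (Python) =====
-- def spin_cycle(board):
--     for r in range(len(board)):
--         for c in range(len(board[r])):
--             cur = board[r][c]
--             if cur == "O":
--                 nxt = r
--
--                 while nxt - 1 >= 0 and board[nxt - 1][c] == ".":
--                     nxt -= 1
--
--                 tmp = board[nxt][c]
--                 board[nxt][c] = cur
--                 board[r][c] = tmp
--
--     for c in range(len(board)):
--         for r in range(len(board[r])):
--             cur = board[r][c]
--             if cur == "O":
--                 nxt = c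
--
--                 while nxt - 1 >= 0 and board[r][nxt - 1] == ".":
--                     nxt -= 1
--
--                 tmp = board[r][nxt]
--                 board[r][nxt] = cur
--                 board[r][c] = tmp
--
--     for r in reversed(range(len(board))):
--         for c in range(len(board[r])):
--             cur = board[r][c]
--             if cur == "O":
--                 nxt = r
--
--                 while nxt + 1 < len(board) and board[nxt + 1][c] == ".":
--                     nxt += 1
--
--                 tmp = board[nxt][c]
--                 board[nxt][c] = cur
--                 board[r][c] = tmp
--
--     for c in reversed(range(len(board))):
--         for r in range(len(board[r])):
--             cur = board[r][c]
--             if cur == "O":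
--                 nxt = c
--
--                 while nxt + 1 < len(board) and board[r][nxt + 1] == ".":
--                     nxt += 1
--
--                 tmp = board[r][nxt]
--                 board[r][nxt] = cur
--                 board[r][c] = tmp
--
--     return board
-- ===== SOURCE B (Python) =====
-- # B: four single-pass next-free-slot sweeps over index-transposed lines
-- # instead of A's per-rock while-loop sliding; same in-place result via board[:] = ...
-- def _tilt_left(row):
--     res = list(row)
--     free = 0
--     for i in range(len(row)):
--         x = row[i]
--         if x == "O":
--             res[i] = "."
--             res[free] = "O"
--             free += 1
--         elif x != ".":
--             free = i + 1
--     return res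
--
-- def _tilt_right(row):
--     return _tilt_left(row[::-1])[::-1]
--
-- def spin_cycle(board):
--     n = len(board)
--     cols = [[board[r][c] for r in range(n)] for c in range(n)]
--     cols = [_tilt_left(col) for col in cols]                      # north
--     rows = [[cols[c][r] for c in range(n)] for r in range(n)]
--     rows = [_tilt_left(row) for row in rows]                      # west
--     cols = [[rows[r][c] for r in range(n)] for c in range(n)]
--     cols = [_tilt_right(col) for col in cols]                     # south
--     rows = [[cols[c][r] for c in range(n)] for r in range(n)]
--     rows = [_tilt_right(row) for row in rows]                     # east
--     board[:] = rows
--     return board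
-- ===== Notes on version B (the rewrite author's own statement) =====
-- stated objective: alternative
-- what changed: replaces A's per-rock while-loop sliding over the mutable grid by four single-pass next-free-slot sweeps over index-transposed lines
-- outside the precondition, e.g. on spin_cycle([[], []]): A returns [[], []], B raises IndexError
import Mathlib
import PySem

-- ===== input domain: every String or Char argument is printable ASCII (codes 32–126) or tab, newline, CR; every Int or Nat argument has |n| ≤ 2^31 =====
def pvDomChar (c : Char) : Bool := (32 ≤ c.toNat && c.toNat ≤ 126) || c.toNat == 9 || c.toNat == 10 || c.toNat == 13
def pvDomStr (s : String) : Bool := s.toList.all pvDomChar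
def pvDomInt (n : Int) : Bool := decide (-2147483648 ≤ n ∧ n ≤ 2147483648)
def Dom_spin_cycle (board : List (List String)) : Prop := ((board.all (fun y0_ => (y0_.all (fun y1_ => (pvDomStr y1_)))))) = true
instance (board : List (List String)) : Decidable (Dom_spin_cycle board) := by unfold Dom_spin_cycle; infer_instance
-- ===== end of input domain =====

-- B replaces A's per-rock while-loop sliding by four single-pass next-free-slot sweeps over
-- index-transposed lines (objective: alternative). Both A and B mutate `board` in place in
-- Python; the equivalence proved here is about the RETURN value.

-- ===== PORT A =====
def getCell (b : List (List String)) (r c : Nat) : String := (b.getD r []).getD c ""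
def setCell (b : List (List String)) (r c : Nat) (v : String) : List (List String) :=
  b.set r ((b.getD r []).set c v)

-- while nxt - 1 >= 0 and board[nxt - 1][c] == ".": nxt -= 1   (loop 1)
def upNxtA (b : List (List String)) (c : Nat) : Nat → Nat
  | 0 => 0
  | n + 1 => if getCell b n c = "." then upNxtA b c n else n + 1

-- while nxt - 1 >= 0 and board[r][nxt - 1] == ".": nxt -= 1   (loop 2)
def leftNxtA (b : List (List String)) (r : Nat) : Nat → Nat
  | 0 => 0
  | n + 1 => if getCell b r n = "." then leftNxtA b r n else n + 1

-- while nxt + 1 < len(board) and board[nxt + 1][c] == ".": nxt += 1   (loop 3)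
def downNxtA (b : List (List String)) (c : Nat) (nxt : Nat) : Nat :=
  if _h : nxt + 1 < b.length then
    if getCell b (nxt + 1) c = "." then downNxtA b c (nxt + 1) else nxt
  else nxt
termination_by b.length - nxt

-- while nxt + 1 < len(board) and board[r][nxt + 1] == ".": nxt += 1   (loop 4)
def rightNxtA (b : List (List String)) (r : Nat) (nxt : Nat) : Nat :=
  if _h : nxt + 1 < b.length then
    if getCell b r (nxt + 1) = "." then rightNxtA b r (nxt + 1) else nxt
  else nxt
termination_by b.length - nxt

def stepN (b : List (List String)) (r c : Nat) : List (List String) :=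
  let cur := getCell b r c
  if cur = "O" then
    let nxt := upNxtA b c r
    let tmp := getCell b nxt c
    setCell (setCell b nxt c cur) r c tmp
  else b

def stepW (b : List (List String)) (r c : Nat) : List (List String) :=
  let cur := getCell b r c
  if cur = "O" then
    let nxt := leftNxtA b r c
    let tmp := getCell b r nxt
    setCell (setCell b r nxt cur) r c tmp
  else b

def stepS (b : List (List String)) (r c : Nat) : List (List String) :=
  let cur := getCell b r c
  if cur = "O" then
    let nxt := downNxtA b c r
    let tmp := getCell b nxt c
    setCell (setCell b nxt c cur) r c tmp
  else b

def stepE (b : List (List String)) (r c : Nat) : List (List String) :=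
  let cur := getCell b r c
  if cur = "O" then
    let nxt := rightNxtA b r c
    let tmp := getCell b r nxt
    setCell (setCell b r nxt cur) r c tmp
  else b

-- for r in range(len(board)): for c in range(len(board[r])): …
def pass1 (b : List (List String)) : List (List String) :=
  (List.range b.length).foldl
    (fun m r => (List.range ((m.getD r []).length)).foldl (fun m2 c => stepN m2 r c) m) b

-- for c in range(len(board)): for r in range(len(board[r])): …   (r is stale: len(board)-1 after loop 1)
def pass2 (b : List (List String)) : List (List String) :=
  (List.range b.length).foldl
    (fun m c => (List.range ((m.getD (m.length - 1) []).length)).foldl (fun m2 r => stepW m2 r c) m) b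

-- for r in reversed(range(len(board))): for c in range(len(board[r])): …
def pass3 (b : List (List String)) : List (List String) :=
  ((List.range b.length).reverse).foldl
    (fun m r => (List.range ((m.getD r []).length)).foldl (fun m2 c => stepS m2 r c) m) b

-- for c in reversed(range(len(board))): for r in range(len(board[r])): …   (r is stale: 0 after loop 3)
def pass4 (b : List (List String)) : List (List String) :=
  ((List.range b.length).reverse).foldl
    (fun m c => (List.range ((m.getD 0 []).length)).foldl (fun m2 r => stepE m2 r c) m) b

def spin_cycle (board : List (List String)) : List (List String) :=
  pass4 (pass3 (pass2 (pass1 board)))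

-- ===== PORT B =====
-- one iteration of _tilt_left's loop body (reads the ORIGINAL row, updates (res, free))
def tStep (row : List String) (st : List String × Nat) (i : Nat) : List String × Nat :=
  let x := row.getD i ""
  if x = "O" then ((st.1.set i ".").set st.2 "O", st.2 + 1)
  else if x = "." then st
  else (st.1, i + 1)

def tiltLeft (row : List String) : List String :=
  ((List.range row.length).foldl (tStep row) (row, 0)).1

def tiltRight (row : List String) : List String :=
  (tiltLeft row.reverse).reverse

-- zip(*b): length = min of the row lengths, i-th tuple = the i-th entry of every row
-- [[m[r][c] for r in range(n)] for c in range(n)]; exact wherever Python B returns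
-- (B raises IndexError on a row shorter than n; those inputs are outside Pre_ and never compared)
def idxT (m : List (List String)) (n : Nat) : List (List String) :=
  (List.range n).map (fun c => (List.range n).map (fun r => (m.getD r []).getD c ""))

def spin_cycle_alt (board : List (List String)) : List (List String) :=
  let n := board.length
  let cols1 := (idxT board n).map tiltLeft
  let rows1 := (idxT cols1 n).map tiltLeft
  let cols2 := (idxT rows1 n).map tiltRight
  (idxT cols2 n).map tiltRight

-- ===== PRECONDITION & SPEC =====
-- Pre_ excludes non-square boards: A raises IndexError on essentially all of them (its inner loops
-- reuse stale row indices and use len(board) as a column bound), and on the degenerate all-empty-rows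
-- boards where A still returns, the preserved row skeleton is an artefact of those stale-index loops
-- never running (B's zip-based tilts drop empty rows there).
def Pre_spin_cycle (board : List (List String)) : Prop :=
  ∀ row ∈ board, row.length = board.length
instance (board : List (List String)) : Decidable (Pre_spin_cycle board) := by
  unfold Pre_spin_cycle; infer_instance

def pvWitness_spin_cycle : List (List String) := [["O", "."], [".", "#"]]

def Spec_spin_cycle (board : List (List String)) (out : List (List String)) : Prop := out = spin_cycle_alt board
instance (board : List (List String)) (out : List (List String)) : Decidable (Spec_spin_cycle board out) := by unfold Spec_spin_cycle; infer_instance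

-- ===== CLAIM (what is proved, stated in full; the proofs are below) =====
def Claim_equal_spin_cycle : Prop := ∀ (board : List (List String)), Dom_spin_cycle board → Pre_spin_cycle board → Spec_spin_cycle board (spin_cycle board)

-- ===== LEMMAS AND PROOFS =====

-- a square n×n board, stated through getD so that it survives List.set
def Sq (n : Nat) (b : List (List String)) : Prop :=
  b.length = n ∧ ∀ r < n, (b.getD r []).length = n

def getCol (b : List (List String)) (c : Nat) : List String :=
  b.map (fun row => row.getD c "")

-- 1D mirrors of A's sliding step
def upNxt1 (l : List String) : Nat → Nat
  | 0 => 0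
  | n + 1 => if l.getD n "" = "." then upNxt1 l n else n + 1

def downNxt1 (n : Nat) (l : List String) (nxt : Nat) : Nat :=
  if _h : nxt + 1 < n then
    if l.getD (nxt + 1) "" = "." then downNxt1 n l (nxt + 1) else nxt
  else nxt
termination_by n - nxt

def slideIdx (l : List String) (i : Nat) : List String :=
  if l.getD i "" = "O" then
    (l.set (upNxt1 l i) "O").set i (l.getD (upNxt1 l i) "")
  else l

def slideIdxDown (n : Nat) (l : List String) (i : Nat) : List String :=
  if l.getD i "" = "O" then
    (l.set (downNxt1 n l i) "O").set i (l.getD (downNxt1 n l i) "")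
  else l

-- ---- basic getD/set facts ----
lemma getD_set_eq {α : Type} {l : List α} {i : Nat} (h : i < l.length) (v d : α) :
    (l.set i v).getD i d = v := by
  simp [List.getD_eq_getElem?_getD, h]

lemma getD_set_ne {α : Type} {l : List α} {i j : Nat} (h : i ≠ j) (v d : α) :
    (l.set i v).getD j d = l.getD j d := by
  simp [List.getD_eq_getElem?_getD, h]

lemma set_getD_self {α : Type} {l : List α} {i : Nat} (h : i < l.length) (d : α) :
    l.set i (l.getD i d) = l := by
  rw [List.getD_eq_getElem l d h]; exact List.set_getElem_self ..

lemma ext_getD {α : Type} {l1 l2 : List α} (d : α) (hl : l1.length = l2.length)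
    (h : ∀ k < l1.length, l1.getD k d = l2.getD k d) : l1 = l2 := by
  apply List.ext_getElem hl
  intro k h1 h2
  have := h k h1
  rwa [List.getD_eq_getElem _ d h1, List.getD_eq_getElem _ d h2] at this

lemma getCol_getD (b : List (List String)) (c r : Nat) :
    (getCol b c).getD r "" = getCell b r c := by
  unfold getCol getCell
  by_cases h : r < b.length
  · rw [List.getD_eq_getElem _ _ (by simpa), List.getElem_map, List.getD_eq_getElem _ _ h]
  · rw [List.getD_eq_default _ _ (by simpa using Nat.le_of_not_lt h),
      List.getD_eq_default _ _ (Nat.le_of_not_lt h)]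
    rfl

lemma length_getCol (b : List (List String)) (c : Nat) : (getCol b c).length = b.length := by
  simp [getCol]

lemma getRow_setCell (b : List (List String)) (r c : Nat) (v : String) (r' : Nat) :
    (setCell b r c v).getD r' [] =
      if r' = r ∧ r < b.length then (b.getD r []).set c v else b.getD r' [] := by
  unfold setCell
  by_cases h1 : r' = r
  · subst h1
    by_cases h2 : r' < b.length
    · rw [getD_set_eq h2, if_pos ⟨rfl, h2⟩]
    · rw [if_neg (by tauto), List.set_eq_of_length_le (Nat.le_of_not_lt h2)]
  · rw [if_neg (by tauto), getD_set_ne (fun he => h1 he.symm)]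

lemma length_setCell (b : List (List String)) (r c : Nat) (v : String) :
    (setCell b r c v).length = b.length := by
  simp [setCell]

lemma Sq_setCell {n : Nat} {b : List (List String)} (hb : Sq n b) (r c : Nat) (v : String) :
    Sq n (setCell b r c v) := by
  refine ⟨by rw [length_setCell, hb.1], ?_⟩
  intro r' hr'
  rw [getRow_setCell]
  split_ifs with h
  · rw [List.length_set]; exact h.1 ▸ hb.2 r' hr'
  · exact hb.2 r' hr' 

lemma getCol_setCell {n : Nat} {b : List (List String)} (hb : Sq n b) {r c : Nat}
    (hr : r < n) (hc : c < n) (v : String) (c' : Nat) (_hc' : c' < n) :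
    getCol (setCell b r c v) c' =
      if c' = c then (getCol b c).set r v else getCol b c' := by
  have hrb : r < b.length := hb.1 ▸ hr
  unfold setCell getCol
  rw [List.map_set]
  split_ifs with h
  · subst h
    rw [getD_set_eq (by rw [hb.2 r hr]; exact hc)]
  · rw [getD_set_ne (fun he => h he.symm)]
    have : (b.getD r []).getD c' "" = (b.map (fun row => row.getD c' "")).getD r "" := by
      rw [List.getD_eq_getElem _ _ (show r < (b.map (fun row => row.getD c' "")).length by simpa),
        List.getElem_map, List.getD_eq_getElem _ _ hrb]
    rw [this, set_getD_self (by simpa)]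

-- ---- nxt computations are line-local ----
lemma upNxtA_eq (b : List (List String)) (c : Nat) (k : Nat) :
    upNxtA b c k = upNxt1 (getCol b c) k := by
  induction k with
  | zero => rfl
  | succ n ih => rw [upNxtA, upNxt1, getCol_getD, ih]

lemma leftNxtA_eq (b : List (List String)) (r : Nat) (k : Nat) :
    leftNxtA b r k = upNxt1 (b.getD r []) k := by
  induction k with
  | zero => rfl
  | succ n ih => rw [leftNxtA, upNxt1, ih]; rfl

lemma downNxtA_eq {n : Nat} {b : List (List String)} (hb : b.length = n) (c k : Nat) :
    downNxtA b c k = downNxt1 n (getCol b c) k := by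
  induction k using downNxtA.induct (b := b) (c := c) with
  | case1 k h1 h2 ih =>
    rw [downNxtA, dif_pos h1, if_pos h2, ih]
    conv_rhs => rw [downNxt1]
    rw [dif_pos (hb ▸ h1), if_pos (by rwa [getCol_getD])]
  | case2 k h1 h2 =>
    rw [downNxtA, dif_pos h1, if_neg h2]
    conv_rhs => rw [downNxt1]
    rw [dif_pos (hb ▸ h1), if_neg (by rwa [getCol_getD])]
  | case3 k h1 =>
    rw [downNxtA, dif_neg h1]
    conv_rhs => rw [downNxt1]
    rw [dif_neg (hb ▸ h1)]

lemma rightNxtA_eq {n : Nat} {b : List (List String)} (hb : b.length = n) (r k : Nat) :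
    rightNxtA b r k = downNxt1 n (b.getD r []) k := by
  induction k using rightNxtA.induct (b := b) (r := r) with
  | case1 k h1 h2 ih =>
    rw [rightNxtA, dif_pos h1, if_pos h2, ih]
    conv_rhs => rw [downNxt1]
    rw [dif_pos (hb ▸ h1), if_pos (show (b.getD r []).getD (k + 1) "" = "." from h2)]
  | case2 k h1 h2 =>
    rw [rightNxtA, dif_pos h1, if_neg h2]
    conv_rhs => rw [downNxt1]
    rw [dif_pos (hb ▸ h1), if_neg (show ¬(b.getD r []).getD (k + 1) "" = "." from h2)]
  | case3 k h1 =>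
    rw [rightNxtA, dif_neg h1]
    conv_rhs => rw [downNxt1]
    rw [dif_neg (hb ▸ h1)]

lemma upNxt1_le (l : List String) (k : Nat) : upNxt1 l k ≤ k := by
  induction k with
  | zero => exact Nat.le_refl 0
  | succ n ih =>
    rw [upNxt1]
    split_ifs
    · exact Nat.le_succ_of_le ih
    · exact Nat.le_refl _

lemma downNxt1_lt {n : Nat} (l : List String) {k : Nat} (hk : k < n) : downNxt1 n l k < n := by
  induction k using downNxt1.induct (n := n) (l := l) with
  | case1 k h1 h2 ih => rw [downNxt1, dif_pos h1, if_pos h2]; exact ih h1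
  | case2 k h1 h2 => rw [downNxt1, dif_pos h1, if_neg h2]; exact hk
  | case3 k h1 => rw [downNxt1, dif_neg h1]; exact hk

lemma length_slideIdxDown (n : Nat) (l : List String) (i : Nat) :
    (slideIdxDown n l i).length = l.length := by
  unfold slideIdxDown; split_ifs <;> simp

-- ---- the four steps act on one line ----
lemma stepN_char {n : Nat} {m : List (List String)} (hm : Sq n m) {r c : Nat}
    (hr : r < n) (hc : c < n) :
    Sq n (stepN m r c) ∧ ∀ c' < n, getCol (stepN m r c) c' =
      if c' = c then slideIdx (getCol m c) r else getCol m c' := by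
  have hN : upNxtA m c r = upNxt1 (getCol m c) r := upNxtA_eq m c r
  have hNn : upNxt1 (getCol m c) r < n := Nat.lt_of_le_of_lt (upNxt1_le _ r) hr
  have hcolr : (getCol m c).getD r "" = getCell m r c := getCol_getD m c r
  by_cases hO : getCell m r c = "O"
  · have hstep : stepN m r c = setCell (setCell m (upNxt1 (getCol m c) r) c "O") r c
        (getCell m (upNxt1 (getCol m c) r) c) := by
      rw [stepN]; simp only [hO, hN, if_pos]
    have hsq1 : Sq n (setCell m (upNxt1 (getCol m c) r) c "O") := Sq_setCell hm _ _ _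
    refine ⟨by rw [hstep]; exact Sq_setCell hsq1 _ _ _, ?_⟩
    intro c' hc'
    rw [hstep, getCol_setCell hsq1 hr hc _ c' hc']
    unfold slideIdx
    rw [hcolr, if_pos hO]
    by_cases h : c' = c
    · subst h
      rw [if_pos rfl, if_pos rfl, getCol_setCell hm hNn hc _ c' hc', if_pos rfl, getCol_getD]
    · rw [if_neg h, if_neg h, getCol_setCell hm hNn hc _ c' hc', if_neg h]
  · have hstep : stepN m r c = m := by
      rw [stepN]; simp only [if_neg hO]
    refine ⟨by rw [hstep]; exact hm, ?_⟩
    intro c' hc'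
    rw [hstep]
    unfold slideIdx
    rw [hcolr, if_neg hO]
    split_ifs with h
    · rw [h]
    · rfl

lemma stepW_char {n : Nat} {m : List (List String)} (hm : Sq n m) {c r : Nat}
    (_hc : c < n) (hr : r < n) :
    Sq n (stepW m r c) ∧ ∀ r' < n, (stepW m r c).getD r' [] =
      if r' = r then slideIdx (m.getD r []) c else m.getD r' [] := by
  have hrb : r < m.length := hm.1 ▸ hr
  have hN : leftNxtA m r c = upNxt1 (m.getD r []) c := leftNxtA_eq m r c
  have hO' : getCell m r c = (m.getD r []).getD c "" := rfl
  by_cases hO : getCell m r c = "O"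
  · have hstep : stepW m r c = setCell (setCell m r (upNxt1 (m.getD r []) c) "O") r c
        (getCell m r (upNxt1 (m.getD r []) c)) := by
      rw [stepW]; simp only [hO, hN, if_pos]
    have hsq1 : Sq n (setCell m r (upNxt1 (m.getD r []) c) "O") := Sq_setCell hm _ _ _
    have hlen : r < (setCell m r (upNxt1 (m.getD r []) c) "O").length := by
      rw [length_setCell]; exact hrb
    refine ⟨by rw [hstep]; exact Sq_setCell hsq1 _ _ _, ?_⟩
    intro r' hr'
    rw [hstep]
    unfold slideIdx
    rw [← hO', if_pos hO]
    by_cases h : r' = r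
    · subst h
      rw [getRow_setCell, if_pos ⟨rfl, hlen⟩, getRow_setCell, if_pos ⟨rfl, hrb⟩, if_pos rfl]
      rfl
    · rw [getRow_setCell, if_neg (fun hh => h hh.1), getRow_setCell,
        if_neg (fun hh => h hh.1), if_neg h]
  · have hstep : stepW m r c = m := by
      rw [stepW]; simp only [if_neg hO]
    refine ⟨by rw [hstep]; exact hm, ?_⟩
    intro r' hr'
    rw [hstep]
    unfold slideIdx
    rw [← hO', if_neg hO]
    split_ifs with h
    · rw [h]
    · rfl


lemma stepS_char {n : Nat} {m : List (List String)} (hm : Sq n m) {r c : Nat}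
    (hr : r < n) (hc : c < n) :
    Sq n (stepS m r c) ∧ ∀ c' < n, getCol (stepS m r c) c' =
      if c' = c then slideIdxDown n (getCol m c) r else getCol m c' := by
  have hN : downNxtA m c r = downNxt1 n (getCol m c) r := downNxtA_eq hm.1 c r
  have hNn : downNxt1 n (getCol m c) r < n := downNxt1_lt _ hr
  have hcolr : (getCol m c).getD r "" = getCell m r c := getCol_getD m c r
  by_cases hO : getCell m r c = "O"
  · have hstep : stepS m r c = setCell (setCell m (downNxt1 n (getCol m c) r) c "O") r c
        (getCell m (downNxt1 n (getCol m c) r) c) := by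
      rw [stepS]; simp only [hO, hN, if_pos]
    have hsq1 : Sq n (setCell m (downNxt1 n (getCol m c) r) c "O") := Sq_setCell hm _ _ _
    refine ⟨by rw [hstep]; exact Sq_setCell hsq1 _ _ _, ?_⟩
    intro c' hc'
    rw [hstep, getCol_setCell hsq1 hr hc _ c' hc']
    unfold slideIdxDown
    rw [hcolr, if_pos hO]
    by_cases h : c' = c
    · subst h
      rw [if_pos rfl, if_pos rfl, getCol_setCell hm hNn hc _ c' hc', if_pos rfl, getCol_getD]
    · rw [if_neg h, if_neg h, getCol_setCell hm hNn hc _ c' hc', if_neg h]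
  · have hstep : stepS m r c = m := by
      rw [stepS]; simp only [if_neg hO]
    refine ⟨by rw [hstep]; exact hm, ?_⟩
    intro c' hc'
    rw [hstep]
    unfold slideIdxDown
    rw [hcolr, if_neg hO]
    split_ifs with h
    · rw [h]
    · rfl


lemma stepE_char {n : Nat} {m : List (List String)} (hm : Sq n m) {c r : Nat}
    (_hc : c < n) (hr : r < n) :
    Sq n (stepE m r c) ∧ ∀ r' < n, (stepE m r c).getD r' [] =
      if r' = r then slideIdxDown n (m.getD r []) c else m.getD r' [] := by
  have hrb : r < m.length := hm.1 ▸ hr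
  have hN : rightNxtA m r c = downNxt1 n (m.getD r []) c := rightNxtA_eq hm.1 r c
  have hO' : getCell m r c = (m.getD r []).getD c "" := rfl
  by_cases hO : getCell m r c = "O"
  · have hstep : stepE m r c = setCell (setCell m r (downNxt1 n (m.getD r []) c) "O") r c
        (getCell m r (downNxt1 n (m.getD r []) c)) := by
      rw [stepE]; simp only [hO, hN, if_pos]
    have hsq1 : Sq n (setCell m r (downNxt1 n (m.getD r []) c) "O") := Sq_setCell hm _ _ _
    have hlen : r < (setCell m r (downNxt1 n (m.getD r []) c) "O").length := by
      rw [length_setCell]; exact hrb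
    refine ⟨by rw [hstep]; exact Sq_setCell hsq1 _ _ _, ?_⟩
    intro r' hr'
    rw [hstep]
    unfold slideIdxDown
    rw [← hO', if_pos hO]
    by_cases h : r' = r
    · subst h
      rw [getRow_setCell, if_pos ⟨rfl, hlen⟩, getRow_setCell, if_pos ⟨rfl, hrb⟩, if_pos rfl]
      rfl
    · rw [getRow_setCell, if_neg (fun hh => h hh.1), getRow_setCell,
        if_neg (fun hh => h hh.1), if_neg h]
  · have hstep : stepE m r c = m := by
      rw [stepE]; simp only [if_neg hO]
    refine ⟨by rw [hstep]; exact hm, ?_⟩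
    intro r' hr'
    rw [hstep]
    unfold slideIdxDown
    rw [← hO', if_neg hO]
    split_ifs with h
    · rw [h]
    · rfl


-- ---- generic factoring of the nested fold into independent per-line folds ----
lemma inner_factor {n : Nat} (L : List (List String) → Nat → List String)
    (St : List (List String) → Nat → Nat → List (List String))
    (g : List String → Nat → List String) (i : Nat)
    (hstep : ∀ m j, Sq n m → j < n → Sq n (St m i j) ∧ ∀ j' < n,
      L (St m i j) j' = if j' = j then g (L m j) i else L m j') :
    ∀ (js : List Nat) (m : List (List String)), js.Nodup → (∀ j ∈ js, j < n) → Sq n m →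
      Sq n (js.foldl (fun a j => St a i j) m) ∧
      ∀ j' < n, L (js.foldl (fun a j => St a i j) m) j' =
        if j' ∈ js then g (L m j') i else L m j' := by
  intro js
  induction js with
  | nil =>
    intro m _ _ hm
    refine ⟨hm, ?_⟩
    intro j' _
    simp
  | cons j0 js ih =>
    intro m hnd hmem hm
    have hj0 : j0 < n := hmem _ (List.mem_cons_self ..)
    obtain ⟨hsq1, hline1⟩ := hstep m j0 hm hj0
    obtain ⟨hsq2, hline2⟩ := ih (St m i j0) (List.Nodup.of_cons hnd)
      (fun j hj => hmem _ (List.mem_cons_of_mem _ hj)) hsq1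
    refine ⟨hsq2, ?_⟩
    intro j' hj'
    rw [List.foldl_cons, hline2 j' hj', hline1 j' hj']
    by_cases h0 : j' = j0
    · subst h0
      have hnin : j' ∉ js := (List.nodup_cons.mp hnd).1
      rw [if_pos rfl, if_neg hnin, if_pos (List.mem_cons_self ..)]
    · rw [if_neg h0]
      by_cases h1 : j' ∈ js
      · rw [if_pos h1, if_pos (List.mem_cons_of_mem _ h1)]
      · rw [if_neg h1, if_neg (by simp [h0, h1])]

lemma outer_factor {n : Nat} (L : List (List String) → Nat → List String)
    (St : List (List String) → Nat → Nat → List (List String))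
    (g : List String → Nat → List String)
    (KK : List (List String) → Nat → Nat)
    (hK : ∀ m i, Sq n m → i < n → KK m i = n)
    (hstep : ∀ m i j, Sq n m → i < n → j < n → Sq n (St m i j) ∧ ∀ j' < n,
      L (St m i j) j' = if j' = j then g (L m j) i else L m j') :
    ∀ (ps : List Nat) (m : List (List String)), (∀ i ∈ ps, i < n) → Sq n m →
      Sq n (ps.foldl (fun a i => (List.range (KK a i)).foldl (fun a2 j => St a2 i j) a) m) ∧
      ∀ j < n, L (ps.foldl (fun a i => (List.range (KK a i)).foldl (fun a2 j => St a2 i j) a) m) j =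
        ps.foldl g (L m j) := by
  intro ps
  induction ps with
  | nil =>
    intro m _ hm
    exact ⟨hm, fun j _ => rfl⟩
  | cons p ps ih =>
    intro m hmem hm
    have hp : p < n := hmem _ (List.mem_cons_self ..)
    have hKK : KK m p = n := hK m p hm hp
    obtain ⟨hsq1, hline1⟩ := inner_factor L St g p (fun m2 j hm2 hj => hstep m2 p j hm2 hp hj)
      (List.range n) m (List.nodup_range) (fun j hj => List.mem_range.mp hj) hm
    rw [List.foldl_cons, hKK]
    obtain ⟨hsq2, hline2⟩ := ih ((List.range n).foldl (fun a2 j => St a2 p j) m)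
      (fun i hi => hmem _ (List.mem_cons_of_mem _ hi)) hsq1
    refine ⟨hsq2, ?_⟩
    intro j hj
    rw [hline2 j hj, hline1 j hj, if_pos (List.mem_range.mpr hj), List.foldl_cons]

-- ---- pass characterisations ----
lemma pass1_char {n : Nat} {b : List (List String)} (hb : Sq n b) :
    Sq n (pass1 b) ∧ ∀ c < n, getCol (pass1 b) c = (List.range n).foldl slideIdx (getCol b c) := by
  have h := outer_factor getCol stepN slideIdx (fun a r => (a.getD r []).length)
    (fun m i hm hi => hm.2 i hi) (fun m i j hm hi hj => stepN_char hm hi hj)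
    (List.range b.length) b (fun i hi => hb.1 ▸ List.mem_range.mp hi) hb
  unfold pass1
  rw [hb.1]
  rw [hb.1] at h
  exact h

lemma pass2_char {n : Nat} {b : List (List String)} (hb : Sq n b) :
    Sq n (pass2 b) ∧ ∀ r < n, (pass2 b).getD r [] = (List.range n).foldl slideIdx (b.getD r []) := by
  have h := outer_factor (fun m r => m.getD r []) (fun a i j => stepW a j i) slideIdx
    (fun a _i => (a.getD (a.length - 1) []).length)
    (fun m i hm hi => by
      show (m.getD (m.length - 1) []).length = n
      have hl := hm.1
      exact hm.2 _ (by omega))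
    (fun m i j hm hi hj => stepW_char hm hi hj)
    (List.range b.length) b (fun i hi => hb.1 ▸ List.mem_range.mp hi) hb
  unfold pass2
  rw [hb.1]
  rw [hb.1] at h
  exact h

lemma pass3_char {n : Nat} {b : List (List String)} (hb : Sq n b) :
    Sq n (pass3 b) ∧ ∀ c < n, getCol (pass3 b) c =
      ((List.range n).reverse).foldl (slideIdxDown n) (getCol b c) := by
  have h := outer_factor getCol stepS (slideIdxDown n) (fun a r => (a.getD r []).length)
    (fun m i hm hi => hm.2 i hi) (fun m i j hm hi hj => stepS_char hm hi hj)
    ((List.range b.length).reverse) b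
    (fun i hi => hb.1 ▸ List.mem_range.mp (List.mem_reverse.mp hi)) hb
  unfold pass3
  rw [hb.1]
  rw [hb.1] at h
  exact h

lemma pass4_char {n : Nat} {b : List (List String)} (hb : Sq n b) :
    Sq n (pass4 b) ∧ ∀ r < n, (pass4 b).getD r [] =
      ((List.range n).reverse).foldl (slideIdxDown n) (b.getD r []) := by
  have h := outer_factor (fun m r => m.getD r []) (fun a i j => stepE a j i) (slideIdxDown n)
    (fun a _i => (a.getD 0 []).length)
    (fun m i hm hi => by
      show (m.getD 0 []).length = n
      exact hm.2 0 (by omega))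
    (fun m i j hm hi hj => stepE_char hm hi hj)
    ((List.range b.length).reverse) b
    (fun i hi => hb.1 ▸ List.mem_range.mp (List.mem_reverse.mp hi)) hb
  unfold pass4
  rw [hb.1]
  rw [hb.1] at h
  exact h

-- ---- 1D: per-rock sliding equals the next-free-slot sweep ----
lemma upNxt1_char {m : List String} {f k : Nat} (hfk : f ≤ k)
    (hmid : ∀ j, f ≤ j → j < k → m.getD j "" = ".")
    (hb : f = 0 ∨ m.getD (f - 1) "" ≠ ".") : upNxt1 m k = f := by
  induction k with
  | zero =>
    have h0 : f = 0 := Nat.le_zero.mp hfk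
    rw [h0]
    rfl
  | succ k ih =>
    by_cases hf : f = k + 1
    · have hne : m.getD k "" ≠ "." := by
        rcases hb with h0 | h0
        · omega
        · simpa [hf] using h0
      rw [upNxt1, if_neg hne, hf]
    · have hfk' : f ≤ k := by omega
      rw [upNxt1, if_pos (hmid k hfk' (Nat.lt_succ_self k))]
      exact ih hfk' (fun j h1 h2 => hmid j h1 (by omega))

lemma core_tilt (l : List String) : ∀ k, k ≤ l.length →
    (List.range k).foldl slideIdx l = ((List.range k).foldl (tStep l) (l, 0)).1 ∧
    ((List.range k).foldl (tStep l) (l, 0)).1.length = l.length ∧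
    ((List.range k).foldl (tStep l) (l, 0)).2 ≤ k ∧
    (∀ j, k ≤ j → ((List.range k).foldl (tStep l) (l, 0)).1.getD j "" = l.getD j "") ∧
    (∀ j, ((List.range k).foldl (tStep l) (l, 0)).2 ≤ j → j < k →
      ((List.range k).foldl (tStep l) (l, 0)).1.getD j "" = ".") ∧
    (((List.range k).foldl (tStep l) (l, 0)).2 = 0 ∨
      ((List.range k).foldl (tStep l) (l, 0)).1.getD
        (((List.range k).foldl (tStep l) (l, 0)).2 - 1) "" ≠ ".") := by
  intro k
  induction k with
  | zero =>
    intro _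
    exact ⟨rfl, rfl, Nat.le_refl 0, fun j _ => rfl, fun j h1 h2 => absurd h2 (by omega), Or.inl rfl⟩
  | succ k ih =>
    intro hk1
    have hk : k < l.length := hk1
    obtain ⟨hS, hlen, hfree, hsuf, hmid, hbd⟩ := ih (Nat.le_of_lt hk1)
    set st := (List.range k).foldl (tStep l) (l, 0) with hst
    rw [List.range_succ, List.foldl_append, List.foldl_append, List.foldl_cons,
      List.foldl_cons, List.foldl_nil, List.foldl_nil, ← hst, hS]
    have hgk : st.1.getD k "" = l.getD k "" := hsuf k (Nat.le_refl k)
    by_cases hO : l.getD k "" = "O"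
    · have hts : tStep l st k = ((st.1.set k ".").set st.2 "O", st.2 + 1) := by
        unfold tStep
        rw [if_pos hO]
      have hup : upNxt1 st.1 k = st.2 := upNxt1_char hfree hmid hbd
      rw [hts]
      have heq : slideIdx st.1 k = (st.1.set k ".").set st.2 "O" := by
        unfold slideIdx
        rw [hgk, if_pos hO, hup]
        by_cases hf : st.2 = k
        · rw [hf, hgk, hO, List.set_set, List.set_set]
        · have hflt : st.2 < k := by omega
          rw [hmid st.2 (Nat.le_refl _) hflt, List.set_comm _ _ hf]
      refine ⟨by rw [heq], by simp [hlen], by omega, ?_, ?_, ?_⟩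
      · intro j hj
        rw [getD_set_ne (by omega), getD_set_ne (by omega)]
        exact hsuf j (by omega)
      · intro j h1 h2
        by_cases hjk : j = k
        · subst hjk
          rw [getD_set_ne (by omega), getD_set_eq (by omega)]
        · rw [getD_set_ne (by omega), getD_set_ne (by omega)]
          exact hmid j (by omega) (by omega)
      · refine Or.inr ?_
        have : ((st.1.set k ".").set st.2 "O").getD (st.2 + 1 - 1) "" = "O" := by
          have h2 : st.2 + 1 - 1 = st.2 := by omega
          rw [h2, getD_set_eq (by simp [hlen]; omega)]
        rw [this]
        decide
    · by_cases hD : l.getD k "" = "."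
      · have hts : tStep l st k = st := by
          unfold tStep
          rw [if_neg hO, if_pos hD]
        rw [hts]
        have heq : slideIdx st.1 k = st.1 := by
          unfold slideIdx
          rw [hgk, if_neg hO]
        refine ⟨by rw [heq], hlen, by omega, ?_, ?_, hbd⟩
        · intro j hj
          exact hsuf j (by omega)
        · intro j h1 h2
          by_cases hjk : j = k
          · subst hjk; rw [hgk, hD]
          · exact hmid j h1 (by omega)
      · have hts : tStep l st k = (st.1, k + 1) := by
          unfold tStep
          rw [if_neg hO, if_neg hD]
        rw [hts]
        have heq : slideIdx st.1 k = st.1 := by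
          unfold slideIdx
          rw [hgk, if_neg hO]
        refine ⟨by rw [heq], hlen, Nat.le_refl _, ?_, ?_, ?_⟩
        · intro j hj
          exact hsuf j (by omega)
        · intro j h1 h2
          omega
        · refine Or.inr ?_
          have h2 : k + 1 - 1 = k := by omega
          rw [h2, hgk]
          exact hD

lemma slideAll_eq_tiltLeft (l : List String) :
    (List.range l.length).foldl slideIdx l = tiltLeft l := by
  rw [tiltLeft]
  exact (core_tilt l l.length (Nat.le_refl _)).1

lemma tiltLeft_length (l : List String) : (tiltLeft l).length = l.length := by
  rw [tiltLeft]
  exact (core_tilt l l.length (Nat.le_refl _)).2.1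

-- ---- 1D down direction via reversal ----
lemma getD_reverse {α : Type} {l : List α} {j : Nat} (h : j < l.length) (d : α) :
    l.reverse.getD j d = l.getD (l.length - 1 - j) d := by
  rw [List.getD_eq_getElem _ d (by simpa), List.getElem_reverse, List.getD_eq_getElem _ d (by omega)]

lemma set_reverse {α : Type} {l : List α} {j : Nat} (h : j < l.length) (v : α) :
    l.reverse.set j v = (l.set (l.length - 1 - j) v).reverse := by
  apply List.ext_getElem (by simp)
  intro k hk1 hk2
  have hkl : k < l.length := by simpa using hk1
  simp only [List.getElem_set, List.getElem_reverse, List.length_set]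
  split_ifs with ha hb hb
  · rfl
  · omega
  · omega
  · rfl

lemma downNxt1_eq_rev {n : Nat} {l : List String} (hl : l.length = n) {i : Nat} (hi : i < n) :
    downNxt1 n l i = n - 1 - upNxt1 l.reverse (n - 1 - i) := by
  induction i using downNxt1.induct (n := n) (l := l) with
  | case1 i h1 h2 ih =>
    rw [downNxt1, dif_pos h1, if_pos h2,
      show n - 1 - i = (n - 2 - i) + 1 from by omega, upNxt1,
      getD_reverse (show n - 2 - i < l.length from by omega) "",
      show l.length - 1 - (n - 2 - i) = i + 1 from by omega, if_pos h2,
      show n - 2 - i = n - 1 - (i + 1) from by omega]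
    exact ih h1
  | case2 i h1 h2 =>
    rw [downNxt1, dif_pos h1, if_neg h2,
      show n - 1 - i = (n - 2 - i) + 1 from by omega, upNxt1,
      getD_reverse (show n - 2 - i < l.length from by omega) "",
      show l.length - 1 - (n - 2 - i) = i + 1 from by omega, if_neg h2]
    omega
  | case3 i h1 =>
    rw [downNxt1, dif_neg h1, show n - 1 - i = 0 from by omega]
    show i = n - 1 - upNxt1 l.reverse 0
    rw [show upNxt1 l.reverse 0 = 0 from rfl]
    omega

lemma slideIdxDown_rev {n : Nat} {l : List String} (hl : l.length = n) {i : Nat} (hi : i < n) :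
    slideIdxDown n l i = (slideIdx l.reverse (n - 1 - i)).reverse := by
  have hgd : l.reverse.getD (n - 1 - i) "" = l.getD i "" := by
    rw [getD_reverse (show n - 1 - i < l.length from by omega) "",
      show l.length - 1 - (n - 1 - i) = i from by omega]
  unfold slideIdxDown slideIdx
  rw [hgd]
  by_cases hO : l.getD i "" = "O"
  · rw [if_pos hO, if_pos hO]
    have hNlt : downNxt1 n l i < n := downNxt1_lt _ hi
    have hrev : upNxt1 l.reverse (n - 1 - i) = n - 1 - downNxt1 n l i := by
      have h := downNxt1_eq_rev hl hi
      have hup_le : upNxt1 l.reverse (n - 1 - i) ≤ n - 1 - i := upNxt1_le _ _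
      omega
    rw [hrev]
    have hgdN : l.reverse.getD (n - 1 - downNxt1 n l i) "" = l.getD (downNxt1 n l i) "" := by
      rw [getD_reverse (show n - 1 - downNxt1 n l i < l.length from by omega) "",
        show l.length - 1 - (n - 1 - downNxt1 n l i) = downNxt1 n l i from by omega]
    rw [hgdN,
      set_reverse (show n - 1 - downNxt1 n l i < l.length from by omega) "O",
      show l.length - 1 - (n - 1 - downNxt1 n l i) = downNxt1 n l i from by omega,
      set_reverse (show n - 1 - i < (l.set (downNxt1 n l i) "O").length from by
        rw [List.length_set]; omega) (l.getD (downNxt1 n l i) ""),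
      show (l.set (downNxt1 n l i) "O").length - 1 - (n - 1 - i) = i from by
        rw [List.length_set]; omega,
      List.reverse_reverse]
  · rw [if_neg hO, if_neg hO, List.reverse_reverse]

lemma rev_map_range (n : Nat) :
    ((List.range n).reverse).map (fun i => n - 1 - i) = List.range n := by
  induction n with
  | zero => rfl
  | succ n ih =>
    have h1 : (List.range (n + 1)).reverse = n :: (List.range n).reverse := by
      rw [List.range_succ, List.reverse_append]
      rfl
    rw [h1, List.map_cons]
    have h3 : ((List.range n).reverse).map (fun i => n + 1 - 1 - i) =
        ((List.range n).reverse.map (fun i => n - 1 - i)).map (fun x => x + 1) := by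
      rw [List.map_map]
      apply List.map_congr_left
      intro i hi
      have : i < n := List.mem_range.mp (List.mem_reverse.mp hi)
      simp only [Function.comp_apply]
      omega
    rw [h3, ih, show n + 1 - 1 - n = 0 from by omega, List.range_succ_eq_map]

lemma foldDown_eq (n : Nat) : ∀ (ps : List Nat), (∀ i ∈ ps, i < n) →
    ∀ l : List String, l.length = n →
    ps.foldl (slideIdxDown n) l = ((ps.map (fun i => n - 1 - i)).foldl slideIdx l.reverse).reverse := by
  intro ps
  induction ps with
  | nil =>
    intro _ l _
    simp
  | cons p ps ih =>
    intro hmem l hl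
    have hp : p < n := hmem _ (List.mem_cons_self ..)
    have hlen' : (slideIdxDown n l p).length = n := by rw [length_slideIdxDown, hl]
    rw [List.foldl_cons, List.map_cons, List.foldl_cons,
      ih (fun i hi => hmem _ (List.mem_cons_of_mem _ hi)) _ hlen',
      slideIdxDown_rev hl hp, List.reverse_reverse]

lemma slideAllDown_eq_tiltRight {n : Nat} {l : List String} (hl : l.length = n) :
    ((List.range n).reverse).foldl (slideIdxDown n) l = tiltRight l := by
  rw [foldDown_eq n ((List.range n).reverse)
      (fun i hi => List.mem_range.mp (List.mem_reverse.mp hi)) l hl,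
    rev_map_range, tiltRight]
  congr 1
  rw [← slideAll_eq_tiltLeft l.reverse, show l.reverse.length = n from by simp [hl]]

lemma tiltRight_length (l : List String) : (tiltRight l).length = l.length := by
  simp [tiltRight, tiltLeft_length]

-- ---- B-side shape lemmas ----
lemma idxT_getD {n : Nat} {b : List (List String)} (hb : Sq n b) {c : Nat} (hc : c < n) :
    (idxT b n).getD c [] = getCol b c := by
  unfold idxT
  rw [List.getD_eq_getElem _ _ (by simpa using hc), List.getElem_map, List.getElem_range]
  apply ext_getD ""
  · rw [List.length_map, List.length_range, length_getCol, hb.1]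
  · intro k hk
    have hkn : k < n := by simpa using hk
    rw [List.getD_eq_getElem _ _ (by simpa using hkn), List.getElem_map, List.getElem_range,
      getCol_getD]
    rfl

lemma Sq_idxT (b : List (List String)) (n : Nat) : Sq n (idxT b n) := by
  refine ⟨by simp [idxT], ?_⟩
  intro r hr
  unfold idxT
  rw [List.getD_eq_getElem _ _ (by simpa using hr), List.getElem_map]
  simp

lemma map_getD {n : Nat} {b : List (List String)} (hb : b.length = n)
    (f : List String → List String) {r : Nat} (hr : r < n) :
    (b.map f).getD r [] = f (b.getD r []) := by
  rw [List.getD_eq_getElem _ _ (by rw [List.length_map, hb]; exact hr), List.getElem_map,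
    List.getD_eq_getElem _ _ (by rw [hb]; exact hr)]

lemma Sq_map_tilt {n : Nat} {b : List (List String)} (hb : Sq n b)
    (f : List String → List String) (hf : ∀ l, (f l).length = l.length) : Sq n (b.map f) := by
  refine ⟨by rw [List.length_map]; exact hb.1, ?_⟩
  intro r hr
  rw [map_getD hb.1 f hr, hf, hb.2 r hr]

lemma boardExt {n : Nat} {b1 b2 : List (List String)} (h1 : Sq n b1) (h2 : Sq n b2)
    (h : ∀ r < n, ∀ c < n, getCell b1 r c = getCell b2 r c) : b1 = b2 := by
  apply ext_getD ([] : List String) (by rw [h1.1, h2.1])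
  intro r hr
  have hrn : r < n := h1.1 ▸ hr
  apply ext_getD "" (by rw [h1.2 r hrn, h2.2 r hrn])
  intro c hc
  have hcn : c < n := (h1.2 r hrn) ▸ hc
  exact h r hrn c hcn

-- ---- stage equalities ----
lemma stage1 {n : Nat} {b : List (List String)} (hb : Sq n b) :
    pass1 b = idxT ((idxT b n).map tiltLeft) n := by
  have hz1 : Sq n (idxT b n) := Sq_idxT b n
  have hc1 : Sq n ((idxT b n).map tiltLeft) := Sq_map_tilt hz1 tiltLeft tiltLeft_length
  have hz2 : Sq n (idxT ((idxT b n).map tiltLeft) n) := Sq_idxT _ n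
  obtain ⟨hsqp, hcols⟩ := pass1_char hb
  apply boardExt hsqp hz2
  intro r hr c hc
  have hlcol : (getCol b c).length = n := by rw [length_getCol, hb.1]
  conv_lhs => rw [← getCol_getD (pass1 b) c r]
  rw [hcols c hc]
  conv_lhs => rw [← hlcol]
  rw [slideAll_eq_tiltLeft]
  have e1 : getCell (idxT ((idxT b n).map tiltLeft) n) r c
      = (getCol ((idxT b n).map tiltLeft) r).getD c "" := by
    show ((idxT ((idxT b n).map tiltLeft) n).getD r []).getD c "" = _
    rw [idxT_getD hc1 hr]
  rw [e1, getCol_getD]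
  have e2 : getCell ((idxT b n).map tiltLeft) c r = (tiltLeft (getCol b c)).getD r "" := by
    show (((idxT b n).map tiltLeft).getD c []).getD r "" = _
    rw [map_getD hz1.1 tiltLeft hc, idxT_getD hb hc]
  rw [e2]

lemma stage2 {n : Nat} {m : List (List String)} (hm : Sq n m) :
    pass2 m = m.map tiltLeft := by
  obtain ⟨hsq, hrows⟩ := pass2_char hm
  apply ext_getD ([] : List String) (by rw [hsq.1, List.length_map, hm.1])
  intro r hr
  have hrn : r < n := hsq.1 ▸ hr
  rw [hrows r hrn, map_getD hm.1 tiltLeft hrn]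
  have hlr : (m.getD r []).length = n := hm.2 r hrn
  rw [← hlr, slideAll_eq_tiltLeft]

lemma stage3 {n : Nat} {m : List (List String)} (hm : Sq n m) :
    pass3 m = idxT ((idxT m n).map tiltRight) n := by
  have hz1 : Sq n (idxT m n) := Sq_idxT m n
  have hc1 : Sq n ((idxT m n).map tiltRight) := Sq_map_tilt hz1 tiltRight tiltRight_length
  have hz2 : Sq n (idxT ((idxT m n).map tiltRight) n) := Sq_idxT _ n
  obtain ⟨hsqp, hcols⟩ := pass3_char hm
  apply boardExt hsqp hz2
  intro r hr c hc
  have hlcol : (getCol m c).length = n := by rw [length_getCol, hm.1]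
  conv_lhs => rw [← getCol_getD (pass3 m) c r]
  rw [hcols c hc, slideAllDown_eq_tiltRight hlcol]
  have e1 : getCell (idxT ((idxT m n).map tiltRight) n) r c
      = (getCol ((idxT m n).map tiltRight) r).getD c "" := by
    show ((idxT ((idxT m n).map tiltRight) n).getD r []).getD c "" = _
    rw [idxT_getD hc1 hr]
  rw [e1, getCol_getD]
  have e2 : getCell ((idxT m n).map tiltRight) c r = (tiltRight (getCol m c)).getD r "" := by
    show (((idxT m n).map tiltRight).getD c []).getD r "" = _
    rw [map_getD hz1.1 tiltRight hc, idxT_getD hm hc]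
  rw [e2]

lemma stage4 {n : Nat} {m : List (List String)} (hm : Sq n m) :
    pass4 m = m.map tiltRight := by
  obtain ⟨hsq, hrows⟩ := pass4_char hm
  apply ext_getD ([] : List String) (by rw [hsq.1, List.length_map, hm.1])
  intro r hr
  have hrn : r < n := hsq.1 ▸ hr
  rw [hrows r hrn, map_getD hm.1 tiltRight hrn, slideAllDown_eq_tiltRight (hm.2 r hrn)]

-- ===== VERDICT (by name: the statement is the Claim_ definition above) =====
theorem spin_cycle_spec : Claim_equal_spin_cycle := by
  intro board _dom hpre
  unfold Spec_spin_cycle spin_cycle spin_cycle_alt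
  have hb : Sq board.length board := by
    refine ⟨rfl, ?_⟩
    intro r hr
    have hmem : board.getD r [] ∈ board := by
      rw [List.getD_eq_getElem _ _ hr]
      exact List.getElem_mem hr
    exact hpre _ hmem
  have hz1 := Sq_idxT board board.length
  have hc1 := Sq_map_tilt hz1 tiltLeft tiltLeft_length
  have hz2 := Sq_idxT ((idxT board board.length).map tiltLeft) board.length
  have hr2 := Sq_map_tilt hz2 tiltLeft tiltLeft_length
  have hz3 := Sq_idxT ((idxT ((idxT board board.length).map tiltLeft) board.length).map tiltLeft)
    board.length
  have hc2 := Sq_map_tilt hz3 tiltRight tiltRight_length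
  have hz4 := Sq_idxT ((idxT ((idxT ((idxT board board.length).map tiltLeft)
    board.length).map tiltLeft) board.length).map tiltRight) board.length
  show pass4 (pass3 (pass2 (pass1 board))) =
    (idxT ((idxT ((idxT ((idxT board board.length).map tiltLeft) board.length).map tiltLeft)
      board.length).map tiltRight) board.length).map tiltRight
  rw [stage1 hb, stage2 hz2, stage3 hr2, stage4 hz4]
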